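-- pv_equiv track=rewrite | github.com/sharathkumar49/learning | Python programs/LeetCodeSolutions/2107.NumberofUniqueFlavorsAfterSharingKCandies.py | shareCandies
-- ===== SOURCE A (Python) =====
-- def shareCandies(candies, k):
--     from collections import Counter
--     n = len(candies)
--     count = Counter(candies)
--     min_unique = float('inf')
--     for i in range(n-k+1):
--         window = candies[i:i+k]
--         unique = len(set(candies) - set(window))
--         min_unique = min(min_unique, unique)
--     return min_unique
-- ===== SOURCE B (Python) =====
-- def shareCandies(candies, k):
--     from collections import Counter
--     n = len(candies)
--     total = len(set(candies))
--     cnt = Counter(candies[0:k])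
--     d = len(cnt)
--     best = d
--     for i in range(k, n):
--         c = candies[i]
--         cnt[c] += 1
--         if cnt[c] == 1:
--             d += 1
--         o = candies[i - k]
--         cnt[o] -= 1
--         if cnt[o] == 0:
--             d -= 1
--         if d > best:
--             best = d
--     return total - best
-- ===== Notes on version B (the rewrite author's own statement) =====
-- stated objective: faster
-- what changed: Replaces the per-window recomputation of set(candies)-set(window) by the identity answer = total_distinct - max_window_distinct and a single O(n) sliding window that maintains in-window flavor counts and the distinct count incrementally.
-- outside the precondition, e.g. on shareCandies([1, 2, 3], -1): A returns 1, B raises IndexError; on shareCandies([1, 2], 3): A returns inf, B returns 0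
import Mathlib
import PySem

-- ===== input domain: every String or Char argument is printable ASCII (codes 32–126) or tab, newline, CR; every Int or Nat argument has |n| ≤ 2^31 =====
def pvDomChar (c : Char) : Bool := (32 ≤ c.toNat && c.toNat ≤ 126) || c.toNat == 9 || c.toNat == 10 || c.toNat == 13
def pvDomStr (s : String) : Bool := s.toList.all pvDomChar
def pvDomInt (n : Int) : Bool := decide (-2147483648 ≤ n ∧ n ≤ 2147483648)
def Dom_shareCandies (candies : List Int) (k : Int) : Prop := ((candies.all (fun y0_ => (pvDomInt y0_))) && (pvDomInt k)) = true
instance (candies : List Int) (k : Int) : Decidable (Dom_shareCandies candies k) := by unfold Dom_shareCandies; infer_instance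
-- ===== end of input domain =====

-- B replaces A's per-window recomputation of set(candies) - set(window) by the identity
-- answer = total_distinct - max_window_distinct, maintained by one sliding window with
-- incremental in-window counts (measured faster on a timing run's large inputs).

-- ===== PORT A =====
def shareCandies (candies : List Int) (k : Int) : Int :=
  let n : Int := candies.length
  let _count := PySem.Dict.counter candies   -- count = Counter(candies), unused by A
  let r := (PySem.List.pyRange 0 (n - k + 1) 1).foldl
    (fun (minUnique : Option Int) i =>
      let window := PySem.List.slice candies (some i) (some (i + k))
      let unique : Int :=
        ((PySem.Set.ofList candies).diff (PySem.Set.ofList window)).length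
      some (match minUnique with
            | none => unique            -- min(float('inf'), unique) = unique
            | some m => min m unique))
    (none : Option Int)
  match r with
  | some v => v
  | none => 0   -- loop body never ran: Python returns float('inf'), not an int; excluded by Pre_

-- ===== PORT B =====
-- loop body of Source B's 'for i in range(k, n)'
def shareCandiesStep (candies : List Int) (k : Int)
    (st : PySem.Dict Int Int × Int × Int) (i : Int) : PySem.Dict Int Int × Int × Int :=
  let cnt := st.1
  let d := st.2.1
  let best := st.2.2
  let c := PySem.List.pyGetD candies i 0
  let cnt := cnt.insert c (cnt.getD c 0 + 1)
  let d := if cnt.getD c 0 = 1 then d + 1 else d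
  let o := PySem.List.pyGetD candies (i - k) 0
  let cnt := cnt.insert o (cnt.getD o 0 - 1)
  let d := if cnt.getD o 0 = 0 then d - 1 else d
  let best := if best < d then d else best
  (cnt, d, best)

def shareCandies_alt (candies : List Int) (k : Int) : Int :=
  let n : Int := candies.length
  let total : Int := (PySem.Set.ofList candies).length
  let cnt0 := PySem.Dict.counter (PySem.List.slice candies (some 0) (some k))
  let d0 : Int := cnt0.size
  let st := (PySem.List.pyRange k n 1).foldl (shareCandiesStep candies k) (cnt0, d0, d0)
  total - st.2.2

-- ===== PRECONDITION & SPEC =====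
-- Pre_ excludes k > len(candies), where A's loop never runs and it returns float('inf')
-- (a float, not an int), and k < 0, outside the task's natural domain, where B raises
-- IndexError (A's windows there go through negative slice indices).
def Pre_shareCandies (candies : List Int) (k : Int) : Prop :=
  0 ≤ k ∧ k ≤ candies.length
instance (candies : List Int) (k : Int) : Decidable (Pre_shareCandies candies k) := by
  unfold Pre_shareCandies; infer_instance

def pvWitness_shareCandies : List Int × Int := ([1, 2, 2, 3], 2)

def Spec_shareCandies (candies : List Int) (k : Int) (out : Int) : Prop := out = shareCandies_alt candies k
instance (candies : List Int) (k : Int) (out : Int) : Decidable (Spec_shareCandies candies k out) := by unfold Spec_shareCandies; infer_instance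

-- ===== CLAIM (what is proved, stated in full; the proofs are below) =====
def Claim_equal_shareCandies : Prop := ∀ (candies : List Int) (k : Int), Dom_shareCandies candies k → Pre_shareCandies candies k → Spec_shareCandies candies k (shareCandies candies k)

-- ===== LEMMAS AND PROOFS =====

-- the window of length κ starting at j
def pvW (cs : List Int) (κ j : Nat) : List Int := (cs.drop j).take κ

-- number of distinct flavors in the window starting at j
def pvG (cs : List Int) (κ j : Nat) : Int := ((PySem.Set.ofList (pvW cs κ j)).length : Int)

-- running maximum of g over j, j+1, …, j+t-1 starting from b
def pvRunMax (g : Nat → Int) : Nat → Nat → Int → Int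
  | _, 0, b => b
  | j, t+1, b => pvRunMax g (j+1) t (max b (g j))

lemma pv_dcount_congr (l₁ l₂ : List Int) (h : ∀ x, x ∈ l₁ ↔ x ∈ l₂) :
    (PySem.Set.ofList l₁).length = (PySem.Set.ofList l₂).length := by
  refine List.Perm.length_eq ?_
  rw [List.perm_ext_iff_of_nodup (PySem.Set.nodup_ofList l₁) (PySem.Set.nodup_ofList l₂)]
  intro a; rw [PySem.Set.mem_ofList, PySem.Set.mem_ofList]; exact h a

lemma pv_dcount_append (l : List Int) (a : Int) :
    ((PySem.Set.ofList (l ++ [a])).length : Int) =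
      (PySem.Set.ofList l).length + (if a ∈ l then 0 else 1) := by
  rw [PySem.Set.ofList_append_singleton]
  by_cases h : a ∈ l
  · rw [PySem.Set.add_of_mem ((PySem.Set.mem_ofList l a).mpr h), if_pos h]
    simp
  · rw [PySem.Set.add_of_not_mem (fun hc => h ((PySem.Set.mem_ofList l a).mp hc)), if_neg h]
    simp

lemma pv_dcount_cons (a : Int) (l : List Int) :
    ((PySem.Set.ofList (a :: l)).length : Int) =
      (PySem.Set.ofList l).length + (if a ∈ l then 0 else 1) := by
  rw [pv_dcount_congr (a :: l) (l ++ [a]) (by intro x; simp [or_comm])]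
  exact pv_dcount_append l a

lemma pv_diff_len (cs w : List Int) (hw : ∀ x ∈ w, x ∈ cs) :
    (((PySem.Set.ofList cs).diff (PySem.Set.ofList w)).length : Int) =
      ((PySem.Set.ofList cs).length : Int) - ((PySem.Set.ofList w).length : Int) := by
  have hpart : ((PySem.Set.ofList cs).filter
        (fun x => (PySem.Set.ofList w).contains x)).length +
      ((PySem.Set.ofList cs).filter
        (fun x => !(PySem.Set.ofList w).contains x)).length = (PySem.Set.ofList cs).length :=
    (List.length_eq_length_filter_add _).symm
  have hin : ((PySem.Set.ofList cs).filter
        (fun x => (PySem.Set.ofList w).contains x)).length = (PySem.Set.ofList w).length := by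
    refine List.Perm.length_eq ?_
    rw [List.perm_ext_iff_of_nodup ((PySem.Set.nodup_ofList cs).filter _)
      (PySem.Set.nodup_ofList w)]
    intro a
    simp only [List.mem_filter, PySem.Set.mem_ofList, PySem.Set.contains_eq_listContains,
      List.contains_iff_mem]
    exact ⟨fun h => h.2, fun hm => ⟨hw a hm, hm⟩⟩
  have : ((PySem.Set.ofList cs).diff (PySem.Set.ofList w)).length =
      ((PySem.Set.ofList cs).filter (fun x => !(PySem.Set.ofList w).contains x)).length := rfl
  omega

-- window decompositions: the length-(κ+1) window starting at j is the window starting at j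
-- with cs[j+κ] appended, and also cs[j] consed onto the window starting at j+1
lemma pv_snoc (cs : List Int) (κ j : Nat) (h : j + κ < cs.length) :
    pvW cs κ j ++ [cs[j + κ]] = pvW cs (κ + 1) j := by
  unfold pvW
  have hκ : κ < (cs.drop j).length := by simp; omega
  rw [List.take_add_one, List.getElem?_eq_getElem hκ]
  simp [List.getElem_drop]

lemma pv_cons (cs : List Int) (κ j : Nat) (h : j + κ < cs.length) :
    cs[j]'(by omega) :: pvW cs κ (j + 1) = pvW cs (κ + 1) j := by
  unfold pvW
  rw [List.drop_eq_getElem_cons (by omega : j < cs.length), List.take_succ_cons]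

lemma pv_step (cs : List Int) (κ j : Nat) (h : j + κ < cs.length)
    (cnt : PySem.Dict Int Int) (d best : Int)
    (hcnt : ∀ x, cnt.getD x 0 = ((pvW cs κ j).count x : Int)) (hd : d = pvG cs κ j) :
    ∃ cnt', shareCandiesStep cs (↑κ) (cnt, d, best) (↑(j + κ)) =
        (cnt', pvG cs κ (j + 1), max best (pvG cs κ (j + 1))) ∧
      ∀ x, cnt'.getD x 0 = ((pvW cs κ (j + 1)).count x : Int) := by
  have hj : j < cs.length := by omega
  have hcin : PySem.List.pyGetD cs (↑(j + κ)) 0 = cs[j + κ] := by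
    rw [PySem.List.pyGetD_natCast, List.getD_eq_getElem _ _ h]
  have hsub : (↑(j + κ) : Int) - ↑κ = ↑j := by push_cast; ring
  have hcout : PySem.List.pyGetD cs (↑j) 0 = cs[j] := by
    rw [PySem.List.pyGetD_natCast, List.getD_eq_getElem _ _ hj]
  set W := pvW cs κ j with hW
  set W' := pvW cs κ (j + 1) with hW'
  have hVW : W ++ [cs[j + κ]] = cs[j] :: W' := by
    rw [hW, hW', pv_snoc cs κ j h, pv_cons cs κ j h]
  set cnt1 := cnt.insert cs[j + κ] (cnt.getD cs[j + κ] 0 + 1) with hcnt1def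
  have h1 : ∀ x, cnt1.getD x 0 = ((cs[j] :: W').count x : Int) := by
    intro x
    rw [← hVW, hcnt1def, PySem.Dict.getD_insert]
    split_ifs with hx
    · subst hx; rw [hcnt]; simp [List.count_append]
    · have hx' : ¬ (cs[j + κ] = x) := fun he => hx he.symm
      rw [hcnt]; simp [List.count_append, hx']
  set d1 := if cnt1.getD cs[j + κ] 0 = 1 then d + 1 else d with hd1def
  have hd1 : d1 = ((PySem.Set.ofList (cs[j] :: W')).length : Int) := by
    have hcount : cnt1.getD cs[j + κ] 0 = ((W.count cs[j + κ] : Int) + 1) := by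
      rw [hcnt1def, PySem.Dict.getD_insert_self, hcnt]
    have hd' : ((PySem.Set.ofList (cs[j] :: W')).length : Int) =
        ((PySem.Set.ofList W).length : Int) + (if cs[j + κ] ∈ W then 0 else 1) := by
      rw [← hVW]; exact pv_dcount_append W cs[j + κ]
    have hdg : d = ((PySem.Set.ofList W).length : Int) := hd
    by_cases hm : cs[j + κ] ∈ W
    · have hcp : 0 < W.count cs[j + κ] := List.count_pos_iff.mpr hm
      rw [hd1def, hcount, hd', if_neg (by omega), if_pos hm]; omega
    · have hc0 : W.count cs[j + κ] = 0 := List.count_eq_zero.mpr hm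
      rw [hd1def, hcount, hd', if_pos (by rw [hc0]; norm_num), if_neg hm]; omega
  set cnt2 := cnt1.insert cs[j] (cnt1.getD cs[j] 0 - 1) with hcnt2def
  have h2 : ∀ x, cnt2.getD x 0 = ((W'.count x : Int)) := by
    intro x
    rw [hcnt2def, PySem.Dict.getD_insert]
    split_ifs with hx
    · subst hx; rw [h1]; simp [List.count_cons_self]
    · rw [h1]; simp [List.count_cons]
      exact fun he => hx he.symm
  set d2 := if cnt2.getD cs[j] 0 = 0 then d1 - 1 else d1 with hd2def
  have hd2 : d2 = pvG cs κ (j + 1) := by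
    have hcount : cnt2.getD cs[j] 0 = (W'.count cs[j] : Int) := h2 _
    have hd' : ((PySem.Set.ofList (cs[j] :: W')).length : Int) =
        ((PySem.Set.ofList W').length : Int) + (if cs[j] ∈ W' then 0 else 1) := pv_dcount_cons _ _
    by_cases hm : cs[j] ∈ W'
    · have hcp : 0 < W'.count cs[j] := List.count_pos_iff.mpr hm
      rw [hd2def, hcount, hd1, pvG, ← hW', hd', if_neg (by omega), if_pos hm]; omega
    · have hc0 : W'.count cs[j] = 0 := List.count_eq_zero.mpr hm
      rw [hd2def, hcount, hd1, pvG, ← hW', hd', if_pos (by rw [hc0]; norm_num), if_neg hm]; omega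
  refine ⟨cnt2, ?_, h2⟩
  show shareCandiesStep cs (↑κ) (cnt, d, best) (↑(j + κ)) = _
  unfold shareCandiesStep
  simp only [hcin, hsub, hcout]
  rw [← hcnt1def, ← hd1def, ← hcnt2def, ← hd2def, hd2]
  have hbest : (if best < pvG cs κ (j + 1) then pvG cs κ (j + 1) else best) =
      max best (pvG cs κ (j + 1)) := by rw [max_def]; split_ifs <;> omega
  rw [hbest]

lemma pv_fold (cs : List Int) (κ : Nat) : ∀ (t j : Nat) (cnt : PySem.Dict Int Int) (d best : Int),
    (∀ x, cnt.getD x 0 = ((pvW cs κ j).count x : Int)) → d = pvG cs κ j →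
    j + κ + t ≤ cs.length →
    ((PySem.List.pyRange (↑(j + κ)) (↑(j + κ + t)) 1).foldl
        (shareCandiesStep cs (↑κ)) (cnt, d, best)).2.2 = pvRunMax (pvG cs κ) (j + 1) t best := by
  intro t
  induction t with
  | zero =>
    intro j cnt d best hcnt hd hlen
    rw [PySem.List.pyRange_one_eq_nil (by exact_mod_cast Nat.le_of_eq (by omega))]
    simp [pvRunMax]
  | succ t ih =>
    intro j cnt d best hcnt hd hlen
    have hlt : (↑(j + κ) : Int) < ↑(j + κ + (t + 1)) := by exact_mod_cast (by omega : j + κ < j + κ + (t + 1))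
    rw [PySem.List.pyRange_one_cons hlt]
    obtain ⟨cnt', hstep, hcnt'⟩ := pv_step cs κ j (by omega) cnt d best hcnt hd
    rw [List.foldl_cons, hstep]
    have e1 : (↑(j + κ) : Int) + 1 = ↑(j + 1 + κ) := by push_cast; ring
    have e2 : (↑(j + κ + (t + 1)) : Int) = ↑(j + 1 + κ + t) := by push_cast; ring
    rw [e1, e2, ih (j + 1) cnt' _ _ hcnt' rfl (by omega)]
    simp [pvRunMax]

lemma pv_afold (cs : List Int) (κ : Nat) : ∀ (t j : Nat) (b : Int),
    (PySem.List.pyRange (↑j) (↑(j + t)) 1).foldl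
      (fun (minUnique : Option Int) i =>
        some (match minUnique with
              | none =>
                (((PySem.Set.ofList cs).diff
                  (PySem.Set.ofList (PySem.List.slice cs (some i) (some (i + (↑κ : Int)))))).length : Int)
              | some m =>
                min m
                  (((PySem.Set.ofList cs).diff
                    (PySem.Set.ofList (PySem.List.slice cs (some i) (some (i + (↑κ : Int)))))).length : Int)))
      (some (((PySem.Set.ofList cs).length : Int) - b)) =
      some (((PySem.Set.ofList cs).length : Int) - pvRunMax (pvG cs κ) j t b) := by
  intro t
  induction t with
  | zero =>
    intro j b
    rw [PySem.List.pyRange_one_eq_nil (by exact_mod_cast Nat.le_of_eq (by omega))]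
    simp [pvRunMax]
  | succ t ih =>
    intro j b
    have hlt : (↑j : Int) < ↑(j + (t + 1)) := by exact_mod_cast (by omega : j < j + (t + 1))
    rw [PySem.List.pyRange_one_cons hlt, List.foldl_cons]
    simp only []
    have hmem : ∀ x ∈ pvW cs κ j, x ∈ cs := fun x hx =>
      List.mem_of_mem_drop (List.mem_of_mem_take hx)
    have hu : (((PySem.Set.ofList cs).diff
        (PySem.Set.ofList (PySem.List.slice cs (some (↑j)) (some ((↑j) + (↑κ : Int)))))).length : Int)
        = ((PySem.Set.ofList cs).length : Int) - pvG cs κ j := by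
      rw [PySem.List.slice_natCast_add]
      exact pv_diff_len cs _ hmem
    rw [hu]
    have hmin : min (((PySem.Set.ofList cs).length : Int) - b)
        (((PySem.Set.ofList cs).length : Int) - pvG cs κ j)
        = ((PySem.Set.ofList cs).length : Int) - max b (pvG cs κ j) := by
      rw [min_def, max_def]; split_ifs <;> omega
    rw [hmin]
    rw [show ((↑j : Int) + 1) = ((↑(j + 1) : Nat) : Int) by push_cast; ring,
        show ((↑(j + (t + 1)) : Nat) : Int) = ((↑(j + 1 + t) : Nat) : Int) by push_cast; ring,
        ih (j + 1) (max b (pvG cs κ j))]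
    simp [pvRunMax]

-- ===== VERDICT (by name: the statement is the Claim_ definition above) =====
theorem shareCandies_spec : Claim_equal_shareCandies := by
  unfold Claim_equal_shareCandies
  intro candies k hdom hpre
  obtain ⟨hk0, hkn⟩ := hpre
  unfold Spec_shareCandies
  have hkκ : k = (k.toNat : Int) := (Int.toNat_of_nonneg hk0).symm
  set κ := k.toNat with hκdef
  set L := candies.length with hL
  have hκn : κ ≤ L := by omega
  set N := L - κ with hN
  rw [hkκ]
  unfold shareCandies shareCandies_alt
  simp only []
  have hsl0 : PySem.List.slice candies (some 0) (some (↑κ : Int)) = pvW candies κ 0 := by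
    rw [PySem.List.slice_zero_start, PySem.List.slice_to_natCast]
    simp [pvW]
  have hmem0 : ∀ x ∈ pvW candies κ 0, x ∈ candies := fun x hx =>
    List.mem_of_mem_drop (List.mem_of_mem_take hx)
  -- A side
  have hrange : ((↑candies.length : Int) - ↑κ + 1) = ((↑(N + 1) : Nat) : Int) := by
    push_cast; omega
  rw [hrange, PySem.List.pyRange_one_cons (by exact_mod_cast Nat.succ_pos N :
    (0 : Int) < ((↑(N + 1) : Nat) : Int)), List.foldl_cons]
  simp only []
  rw [show ((0 : Int) + (↑κ : Int)) = (↑κ : Int) by ring, hsl0,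
    pv_diff_len candies (pvW candies κ 0) hmem0,
    show (↑(List.length (PySem.Set.ofList (pvW candies κ 0))) : Int) = pvG candies κ 0 from rfl,
    show ((0 : Int) + 1) = ((↑(1 : Nat) : Nat) : Int) by norm_num,
    show ((↑(N + 1) : Nat) : Int) = ((↑(1 + N) : Nat) : Int) by push_cast; ring,
    pv_afold candies κ N 1 (pvG candies κ 0)]
  -- B side
  have hcnt0 : ∀ x, (PySem.Dict.counter (pvW candies κ 0)).getD x 0 =
      (((pvW candies κ 0).count x : Nat) : Int) := fun x => PySem.Dict.getD_counter _ x
  have hd0 : (((PySem.Dict.counter (pvW candies κ 0)).size : Nat) : Int) = pvG candies κ 0 := by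
    rw [show (PySem.Dict.counter (pvW candies κ 0)).size =
        (PySem.Set.ofList (pvW candies κ 0)).length from by
      rw [← PySem.Dict.keys_counter (pvW candies κ 0)]
      simp [PySem.Dict.keys, PySem.Dict.size]]
    rfl
  have hB := pv_fold candies κ N 0 (PySem.Dict.counter (pvW candies κ 0))
    (((PySem.Dict.counter (pvW candies κ 0)).size : Nat) : Int)
    (((PySem.Dict.counter (pvW candies κ 0)).size : Nat) : Int) hcnt0 hd0 (by omega)
  rw [show 0 + κ = κ from by omega, show κ + N = candies.length from by omega,
    show 0 + 1 = 1 from by omega] at hB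
  rw [hB, hd0]
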